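-- pv_equiv track=rewrite | github.com/stasm-skypro/codewars-5-kyu | Around Fibonacci- chunks and counts/Around Fibonacci- chunks and counts.py | around_fib_a2
-- ===== SOURCE A (Python) =====
-- def around_fib_a2(n):
--     """Это решение  прошло проверку и было принято. Но в проследтвии я нашёл где оптимизировать."""
--     fib = lambda n: pow(2 << n, n + 1, (4 << 2 * n) - (2 << n) - 1) % (2 << n)
--
--     sf = str(fib(n))
--     maxcnt, maxd = 0, dict()
--     for ch in sf:
--         cnt = sf.count(ch)
--         if cnt >= maxcnt:
--             maxcnt = cnt
--             if cnt not in maxd: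
--                 maxd[cnt] = []
--             if ch not in maxd[cnt]:
--                 maxd[cnt].append(ch)
--     lk = sorted(maxd.keys())[-1]
--     m  = sorted(maxd[lk])[0]
--
--     ln = len(sf)
--     rem = ln % 25
--     if rem == 0:
--         rem = 25
--     chunk = sf[-rem::]
--
--     return f"Last chunk {chunk}; Max is {maxcnt} for digit {m}"
-- ===== SOURCE B (Python) =====
-- def around_fib_a2(n):
--     """Sort the digits once, then find the max-frequency digit in a single
--     run-length scan over the sorted string (strict '>' keeps the first, i.e.
--     smallest, digit on ties) - no dict bookkeeping, no repeated .count calls."""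
--     fib = lambda n: pow(2 << n, n + 1, (4 << 2 * n) - (2 << n) - 1) % (2 << n)
--
--     sf = str(fib(n))
--     s = sorted(sf)
--     best_d, best_c, run_d, run_c = s[0], 0, s[0], 0
--     for ch in s:
--         if ch == run_d:
--             run_c += 1
--         else:
--             run_d, run_c = ch, 1
--         if run_c > best_c:
--             best_d, best_c = run_d, run_c
--
--     rem = len(sf) % 25
--     if rem == 0:
--         rem = 25
--
--     return f"Last chunk {sf[-rem:]}; Max is {best_c} for digit {best_d}"
-- ===== Notes on version B (the rewrite author's own statement) =====
-- stated objective: alternative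
-- what changed: Replaced A's per-character repeated .count scans plus a count->digits dict with sorted keys by a single sort of the digit string followed by one run-length scan (strict '>' keeps the first, i.e. smallest, digit on ties); the fib formula and last-chunk slice are unchanged.
import Mathlib
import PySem

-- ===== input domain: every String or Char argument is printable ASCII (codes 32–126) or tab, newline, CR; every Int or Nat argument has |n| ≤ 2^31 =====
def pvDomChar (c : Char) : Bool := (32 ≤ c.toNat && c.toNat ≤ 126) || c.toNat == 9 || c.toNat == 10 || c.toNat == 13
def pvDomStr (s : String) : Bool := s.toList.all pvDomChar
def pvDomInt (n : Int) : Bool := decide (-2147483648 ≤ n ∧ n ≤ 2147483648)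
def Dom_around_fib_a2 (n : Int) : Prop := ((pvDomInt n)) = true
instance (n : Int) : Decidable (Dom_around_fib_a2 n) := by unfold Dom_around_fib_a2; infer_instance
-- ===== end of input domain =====

-- B replaces A's repeated .count scans + count→digits dict by one sort and a single
-- run-length scan; same return value on every n on which A returns (0 ≤ n).

-- ===== PORT A =====
def around_fib_a2 (n : Int) : String :=
  let fib : Int → Int := fun n =>
    PySem.Int.mod
      (PySem.Int.powMod (2 <<< n.toNat) (n + 1).toNat
        ((4 <<< (2 * n).toNat) - (2 <<< n.toNat) - 1))
      (2 <<< n.toNat)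
  let sf : List Char := PySem.Int.toChars (fib n)
  let st : Int × PySem.Dict Int (List Char) :=
    sf.foldl (fun st ch =>
      let cnt : Int := (sf.count ch : Int)
      if cnt ≥ st.1 then
        let d := st.2
        let d := if d.contains cnt then d else d.insert cnt []
        let d := if (d.getD cnt []).contains ch then d
                 else d.insert cnt (d.getD cnt [] ++ [ch])
        (cnt, d)
      else st) (0, PySem.Dict.empty)
  let maxcnt : Int := st.1
  let maxd := st.2
  -- sorted(maxd.keys())[-1] and sorted(maxd[lk])[0]: maxd is never empty (sf is the
  -- decimal string of an int, hence nonempty), so the IndexError/KeyError branches are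
  -- unreachable and pyGetD's / getD's defaults are never used.
  let lk : Int := PySem.List.pyGetD (PySem.List.sorted maxd.keys (fun k => k)) (-1) 0
  let m : Char := PySem.List.pyGetD (PySem.List.sorted (maxd.getD lk []) (fun c => c)) 0 ' '
  let ln : Int := PySem.List.len sf
  let rem : Int := PySem.Int.mod ln 25
  let rem : Int := if rem = 0 then 25 else rem
  let chunk : List Char := PySem.List.slice sf (some (-rem)) none
  "Last chunk " ++ String.ofList chunk ++ "; Max is " ++ PySem.Int.toStr maxcnt
    ++ " for digit " ++ String.ofList [m]

-- ===== PORT B =====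
def around_fib_a2_alt (n : Int) : String :=
  let fib : Int → Int := fun n =>
    PySem.Int.mod
      (PySem.Int.powMod (2 <<< n.toNat) (n + 1).toNat
        ((4 <<< (2 * n).toNat) - (2 <<< n.toNat) - 1))
      (2 <<< n.toNat)
  let sf : List Char := PySem.Int.toChars (fib n)
  let s : List Char := PySem.List.sorted sf (fun c => c)
  -- s[0]: sf is never empty, so the IndexError branch is unreachable.
  let s0 : Char := PySem.List.pyGetD s 0 ' '
  let st : Char × Int × Char × Int :=
    s.foldl (fun st ch =>
      let run : Char × Int :=
        if ch = st.2.2.1 then (st.2.2.1, st.2.2.2 + 1) else (ch, (1 : Int))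
      if run.2 > st.2.1 then (run.1, run.2, run.1, run.2)
      else (st.1, st.2.1, run.1, run.2)) (s0, 0, s0, 0)
  let rem : Int := PySem.Int.mod (PySem.List.len sf) 25
  let rem : Int := if rem = 0 then 25 else rem
  "Last chunk " ++ String.ofList (PySem.List.slice sf (some (-rem)) none)
    ++ "; Max is " ++ PySem.Int.toStr st.2.1 ++ " for digit " ++ String.ofList [st.1]

-- ===== PRECONDITION & SPEC =====
-- Pre_ excludes exactly n < 0, where the Python A raises ValueError (negative shift count).
def Pre_around_fib_a2 (n : Int) : Prop := 0 ≤ n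
instance (n : Int) : Decidable (Pre_around_fib_a2 n) := by unfold Pre_around_fib_a2; infer_instance
def pvWitness_around_fib_a2 : Int := (7)

def Spec_around_fib_a2 (n : Int) (out : String) : Prop := out = around_fib_a2_alt n
instance (n : Int) (out : String) : Decidable (Spec_around_fib_a2 n out) := by unfold Spec_around_fib_a2; infer_instance

-- ===== CLAIM (what is proved, stated in full; the proofs are below) =====
def Claim_equal_around_fib_a2 : Prop := ∀ (n : Int), Dom_around_fib_a2 n → Pre_around_fib_a2 n → Spec_around_fib_a2 n (around_fib_a2 n)

-- ===== LEMMAS AND PROOFS =====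

-- str(k) is never empty
theorem toDigitsCore_ne_nil (b : Nat) : ∀ (fuel n : Nat) (acc : List Char),
    acc ≠ [] → Nat.toDigitsCore b fuel n acc ≠ [] := by
  intro fuel
  induction fuel with
  | zero => intro n acc h; simpa [Nat.toDigitsCore] using h
  | succ f ih =>
    intro n acc h
    simp only [Nat.toDigitsCore]
    split
    · simp
    · exact ih _ _ (by simp)

theorem toDigits_ne_nil' (n : Nat) : Nat.toDigits 10 n ≠ [] := by
  unfold Nat.toDigits
  simp only [Nat.toDigitsCore]
  split
  · simp
  · exact toDigitsCore_ne_nil _ _ _ _ (by simp)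

theorem toChars_ne_nil (k : Int) : PySem.Int.toChars k ≠ [] := by
  unfold PySem.Int.toChars
  split
  · simp
  · exact toDigits_ne_nil' _

-- count of c in sf, as a Python int
def cntF (sf : List Char) (c : Char) : Int := (sf.count c : Int)

-- A's loop body, named (syntactically identical to the lambda in the port)
def stepA (sf : List Char) (st : Int × PySem.Dict Int (List Char)) (ch : Char) :
    Int × PySem.Dict Int (List Char) :=
  let cnt : Int := (sf.count ch : Int)
  if cnt ≥ st.1 then
    let d := st.2
    let d := if d.contains cnt then d else d.insert cnt []
    let d := if (d.getD cnt []).contains ch then d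
             else d.insert cnt (d.getD cnt [] ++ [ch])
    (cnt, d)
  else st

-- B's loop body, named (syntactically identical to the lambda in the port)
def stepB (st : Char × Int × Char × Int) (ch : Char) : Char × Int × Char × Int :=
  let run : Char × Int :=
    if ch = st.2.2.1 then (st.2.2.1, st.2.2.2 + 1) else (ch, (1 : Int))
  if run.2 > st.2.1 then (run.1, run.2, run.1, run.2)
  else (st.1, st.2.1, run.1, run.2)

-- elements of a (≤)-pairwise list are ≤ its last element
theorem le_getLast' {α : Type} [LinearOrder α] (l : List α) (h : l ≠ []) (hp : l.Pairwise (· ≤ ·)) :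
    ∀ x ∈ l, x ≤ l.getLast h := by
  induction l with
  | nil => exact absurd rfl h
  | cons a t ih =>
    intro x hx
    rcases eq_or_ne t [] with rfl | ht
    · simp at hx; simp [hx]
    · rw [List.getLast_cons ht]
      rcases List.mem_cons.mp hx with rfl | hx
      · exact (List.pairwise_cons.mp hp).1 _ (List.getLast_mem ht)
      · exact ih ht (List.pairwise_cons.mp hp).2 x hx

theorem foldl_max_le {α : Type} [LinearOrder α] (t : List α) (a b : α)
    (ha : a ≤ b) (hm : ∀ y ∈ t, y ≤ b) : t.foldl max a ≤ b := by
  induction t generalizing a with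
  | nil => exact ha
  | cons c t ih =>
    exact ih (max a c) (max_le ha (hm c (by simp))) (fun y hy => hm y (by simp [hy]))

theorem foldl_max_attain {α : Type} [LinearOrder α] (t : List α) (a : α) :
    t.foldl max a = a ∨ t.foldl max a ∈ t := by
  induction t generalizing a with
  | nil => exact Or.inl rfl
  | cons c t ih =>
    rcases ih (max a c) with h | h
    · rcases max_cases a c with ⟨h1, _⟩ | ⟨h1, _⟩
      · left; rw [List.foldl_cons, h, h1]
      · right; rw [List.foldl_cons, h, h1]; exact List.mem_cons_self ..
    · right; rw [List.foldl_cons]; exact List.mem_cons_of_mem _ h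

-- A's first component is a running max of full-string counts
theorem stepA_fst (sf : List Char) (st : Int × PySem.Dict Int (List Char)) (ch : Char) :
    (stepA sf st ch).1 = max st.1 (cntF sf ch) := by
  unfold stepA
  simp only
  split
  · exact (max_eq_right (by assumption)).symm
  · rename_i h
    exact (max_eq_left (le_of_lt (not_le.mp h))).symm

theorem fstA (sf : List Char) (l : List Char) : ∀ (a : Int) (d : PySem.Dict Int (List Char)),
    (l.foldl (stepA sf) (a, d)).1 = (l.map (cntF sf)).foldl max a := by
  induction l with
  | nil => intro a d; rfl
  | cons c l ih =>
    intro a d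
    rw [List.foldl_cons, List.map_cons, List.foldl_cons]
    rcases hs : stepA sf (a, d) c with ⟨a', d'⟩
    rw [ih]
    have h1 := stepA_fst sf (a, d) c
    rw [hs] at h1
    simp only at h1
    rw [← h1]

-- A's dict invariants: keys bounded by the running max, the running max is a key,
-- and membership of the bucket at M collects exactly the chars of count M
-- A-side dict effect of one accepted iteration
def dA (sf : List Char) (d : PySem.Dict Int (List Char)) (c : Char) : PySem.Dict Int (List Char) :=
  let cnt : Int := (sf.count c : Int)
  let d1 := if d.contains cnt then d else d.insert cnt []
  if (d1.getD cnt []).contains c then d1 else d1.insert cnt (d1.getD cnt [] ++ [c])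

theorem stepA_pos (sf : List Char) (a : Int) (d : PySem.Dict Int (List Char)) (c : Char)
    (h : (sf.count c : Int) ≥ a) : stepA sf (a, d) c = ((sf.count c : Int), dA sf d c) := by
  unfold stepA dA; simp [h]

theorem stepA_neg (sf : List Char) (a : Int) (d : PySem.Dict Int (List Char)) (c : Char)
    (h : ¬((sf.count c : Int) ≥ a)) : stepA sf (a, d) c = (a, d) := by
  unfold stepA; simp [h]

theorem mem_keys_dA (sf : List Char) (d : PySem.Dict Int (List Char)) (c : Char) (k : Int) :
    k ∈ (dA sf d c).keys → k = (sf.count c : Int) ∨ k ∈ d.keys := by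
  unfold dA
  simp only
  split <;> split <;> intro hk <;>
    simp_all [PySem.Dict.mem_keys_insert] <;> tauto

theorem cnt_mem_keys_dA (sf : List Char) (d : PySem.Dict Int (List Char)) (c : Char) :
    (sf.count c : Int) ∈ (dA sf d c).keys := by
  unfold dA
  simp only
  split <;> split <;>
    simp_all [PySem.Dict.mem_keys_insert, PySem.Dict.contains_iff_mem_keys]

theorem getD_dA_of_ne (sf : List Char) (d : PySem.Dict Int (List Char)) (c : Char) (M : Int)
    (h : M ≠ (sf.count c : Int)) : (dA sf d c).getD M [] = d.getD M [] := by
  unfold dA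
  simp only
  split <;> split <;> simp_all [PySem.Dict.getD_insert, h]

theorem mem_getD_dA_self (sf : List Char) (d : PySem.Dict Int (List Char)) (c : Char) (x : Char) :
    x ∈ (dA sf d c).getD (sf.count c : Int) [] ↔ x ∈ d.getD (sf.count c : Int) [] ∨ x = c := by
  unfold dA
  simp only
  by_cases hc : d.contains (sf.count c : Int) = true
  · simp only [hc, if_pos]
    by_cases h2 : ((d.getD ((sf.count c : Int)) []).contains c) = true
    · simp only [h2, if_pos]
      have : c ∈ d.getD ((sf.count c : Int)) [] := by simpa using h2
      constructor
      · tauto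
      · rintro (hx | rfl) <;> [exact hx; exact this]
    · simp only [h2, if_neg, Bool.not_eq_true]
      simp [PySem.Dict.getD_insert]
  · simp only [hc, if_neg, Bool.not_eq_true]
    have hd0 : d.getD ((sf.count c : Int)) [] = [] :=
      PySem.Dict.getD_of_not_contains d [] (by simpa using hc)
    simp [PySem.Dict.getD_insert, hd0]

theorem dictA (sf : List Char) (M : Int) :
    ∀ (l : List Char) (a : Int) (d : PySem.Dict Int (List Char)),
    (∀ c ∈ l, 1 ≤ cntF sf c ∧ cntF sf c ≤ M) →
    0 ≤ a → a ≤ M →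
    (∀ k ∈ d.keys, k ≤ a) → (a ≠ 0 → a ∈ d.keys) →
    (∀ k ∈ (l.foldl (stepA sf) (a, d)).2.keys, k ≤ (l.foldl (stepA sf) (a, d)).1) ∧
    ((l.foldl (stepA sf) (a, d)).1 ≠ 0 → (l.foldl (stepA sf) (a, d)).1 ∈ (l.foldl (stepA sf) (a, d)).2.keys) ∧
    (∀ x, x ∈ (l.foldl (stepA sf) (a, d)).2.getD M [] ↔
      (x ∈ d.getD M [] ∨ (x ∈ l ∧ cntF sf x = M))) := by
  intro l
  induction l with
  | nil =>
    intro a d hl ha0 haM hk hain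
    exact ⟨hk, hain, fun x => by simp⟩
  | cons c l ih =>
    intro a d hl ha0 haM hk hain
    have hc1 : 1 ≤ cntF sf c := (hl c (by simp)).1
    have hcM : cntF sf c ≤ M := (hl c (by simp)).2
    have hl' : ∀ c' ∈ l, 1 ≤ cntF sf c' ∧ cntF sf c' ≤ M := fun c' hc' => hl c' (by simp [hc'])
    rw [List.foldl_cons]
    by_cases hge : (sf.count c : Int) ≥ a
    · rw [stepA_pos sf a d c hge]
      have hcnt1 : (1:Int) ≤ (sf.count c : Int) := by simpa [cntF] using hc1
      have hcntM : (sf.count c : Int) ≤ M := by simpa [cntF] using hcM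
      have hkeys : ∀ k ∈ (dA sf d c).keys, k ≤ (sf.count c : Int) := by
        intro k hk'
        rcases mem_keys_dA sf d c k hk' with rfl | hk''
        · exact le_refl _
        · exact le_trans (hk k hk'') hge
      obtain ⟨g1, g2, g3⟩ := ih (sf.count c : Int) (dA sf d c) hl' (by omega) hcntM hkeys
        (fun _ => cnt_mem_keys_dA sf d c)
      refine ⟨g1, g2, fun x => ?_⟩
      rw [g3 x]
      by_cases hM : (sf.count c : Int) = M
      · rw [← hM, mem_getD_dA_self]
        constructor
        · rintro ((hx | rfl) | ⟨hx, hcx⟩)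
          · exact Or.inl hx
          · exact Or.inr ⟨by simp, by simpa [cntF, hM] using hM⟩
          · exact Or.inr ⟨by simp [hx], by rw [hcx, hM]⟩
        · rintro (hx | ⟨hx, hcx⟩)
          · exact Or.inl (Or.inl hx)
          · rcases List.mem_cons.mp hx with rfl | hx'
            · exact Or.inl (Or.inr rfl)
            · exact Or.inr ⟨hx', by rw [hcx, hM]⟩
      · rw [getD_dA_of_ne sf d c M (fun hh => hM hh.symm)]
        constructor
        · rintro (hx | ⟨hx, hcx⟩)
          · exact Or.inl hx
          · exact Or.inr ⟨by simp [hx], hcx⟩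
        · rintro (hx | ⟨hx, hcx⟩)
          · exact Or.inl hx
          · rcases List.mem_cons.mp hx with rfl | hx'
            · exact absurd (by simpa [cntF] using hcx) hM
            · exact Or.inr ⟨hx', hcx⟩
    · rw [stepA_neg sf a d c hge]
      obtain ⟨g1, g2, g3⟩ := ih a d hl' ha0 haM hk hain
      refine ⟨g1, g2, fun x => ?_⟩
      rw [g3 x]
      have hcne : cntF sf c ≠ M := by
        simp only [cntF] at *
        omega
      constructor
      · rintro (hx | ⟨hx, hcx⟩)
        · exact Or.inl hx
        · exact Or.inr ⟨by simp [hx], hcx⟩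
      · rintro (hx | ⟨hx, hcx⟩)
        · exact Or.inl hx
        · rcases List.mem_cons.mp hx with rfl | hx'
          · exact absurd hcx hcne
          · exact Or.inr ⟨hx', hcx⟩

-- contribution of char y to B's best, given B's state
def contribB (sf : List Char) (st : Char × Int × Char × Int) (y : Char) : Int :=
  if y = st.2.2.1 then st.2.2.2 else cntF sf y

-- B's loop invariant over the processed prefix t of the sorted string
def InvB (sf t : List Char) (st : Char × Int × Char × Int) : Prop :=
  (∀ h : t ≠ [], st.2.2.1 = t.getLast h) ∧
  st.2.2.2 = (t.count st.2.2.1 : Int) ∧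
  (∀ y ∈ t, y ≠ st.2.2.1 → (t.count y : Int) = cntF sf y) ∧
  (∀ y ∈ t, contribB sf st y ≤ st.2.1) ∧
  st.1 ∈ t ∧ contribB sf st st.1 = st.2.1 ∧
  (∀ y ∈ t, contribB sf st y = st.2.1 → st.1 ≤ y)

theorem stepB_pos_eq (bd ch : Char) (bc rc : Int) (hgt : rc + 1 > bc) :
    stepB (bd, bc, ch, rc) ch = (ch, rc + 1, ch, rc + 1) := by
  unfold stepB; simp [hgt]

theorem stepB_pos_ne (bd ch : Char) (bc rc : Int) (hgt : ¬(rc + 1 > bc)) :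
    stepB (bd, bc, ch, rc) ch = (bd, bc, ch, rc + 1) := by
  unfold stepB; simp [hgt]

theorem stepB_new_eq (bd ch rd : Char) (bc rc : Int) (h : ch ≠ rd) (hgt : (1:Int) > bc) :
    stepB (bd, bc, rd, rc) ch = (ch, 1, ch, 1) := by
  unfold stepB; simp [h, hgt]

theorem stepB_new_ne (bd ch rd : Char) (bc rc : Int) (h : ch ≠ rd) (hgt : ¬((1:Int) > bc)) :
    stepB (bd, bc, rd, rc) ch = (bd, bc, ch, 1) := by
  unfold stepB; simp [h, hgt]

theorem stepB_inv (sf t r' : List Char) (ch : Char) (bd : Char) (bc : Int) (rd : Char) (rc : Int)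
    (hp : (t ++ ch :: r').Pairwise (· ≤ ·)) (hperm : (t ++ ch :: r').Perm sf)
    (ht : t ≠ []) (hinv : InvB sf t (bd, bc, rd, rc)) :
    InvB sf (t ++ [ch]) (stepB (bd, bc, rd, rc) ch) := by
  obtain ⟨hrd, hrc, hcomp, hub, hbdmem, hbdc, hmin⟩ := hinv
  simp only [contribB] at hrc hcomp hub hbdc hmin
  simp only at hbdmem
  have hrd' : rd = t.getLast ht := hrd ht
  have hpa := List.pairwise_append.mp hp
  have hpt : t.Pairwise (· ≤ ·) := hpa.1
  have hpr : (ch :: r').Pairwise (· ≤ ·) := hpa.2.1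
  have hcross : ∀ x ∈ t, ∀ y ∈ ch :: r', x ≤ y := hpa.2.2
  have hlet : ∀ x ∈ t, x ≤ rd := by rw [hrd']; exact le_getLast' t ht hpt
  have hrdch : rd ≤ ch := hcross rd (hrd' ▸ List.getLast_mem ht) ch (by simp)
  have hmemt : ∀ {y : Char}, y ∈ t ++ [ch] → y ≠ ch → y ∈ t := by
    intro y hy hyne
    rcases List.mem_append.mp hy with h | h
    · exact h
    · simp at h; exact absurd h hyne
  by_cases hch : ch = rd
  · subst hch
    have hlast : ∀ h, (t ++ [ch]).getLast h = ch := fun _ => by simp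
    have hcount : ((t ++ [ch]).count ch : Int) = rc + 1 := by
      rw [List.count_append, hrc]; simp
    have hcounto : ∀ y, y ≠ ch → (t ++ [ch]).count y = t.count y := by
      intro y hy
      simp [List.count_append, List.count_singleton, hy, Ne.symm hy]
    by_cases hgt : rc + 1 > bc
    · rw [stepB_pos_eq bd ch bc rc hgt]
      refine ⟨fun h => (hlast h).symm, by exact hcount.symm, ?_, ?_, by simp, by simp [contribB], ?_⟩
      · intro y hy hyne
        simp only at hyne
        rw [hcounto y hyne]
        exact hcomp y (hmemt hy hyne) hyne
      · intro y hy
        simp only [contribB]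
        by_cases hyc : y = ch
        · simp [hyc]
        · rw [if_neg hyc]
          have hyt : y ∈ t := hmemt hy hyc
          have := hub y hyt
          rw [if_neg hyc] at this
          omega
      · intro y hy hcy
        simp only [contribB] at hcy
        by_cases hyc : y = ch
        · simp [hyc]
        · rw [if_neg hyc] at hcy
          have hyt : y ∈ t := hmemt hy hyc
          have := hub y hyt
          rw [if_neg hyc] at this
          omega
    · rw [stepB_pos_ne bd ch bc rc hgt]
      have hbdne : bd ≠ ch := by
        intro e
        rw [if_pos e] at hbdc
        omega
      refine ⟨fun h => (hlast h).symm, by exact hcount.symm, ?_, ?_, by simp [hbdmem], ?_, ?_⟩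
      · intro y hy hyne
        simp only at hyne
        rw [hcounto y hyne]
        exact hcomp y (hmemt hy hyne) hyne
      · intro y hy
        simp only [contribB]
        by_cases hyc : y = ch
        · rw [if_pos hyc]; omega
        · rw [if_neg hyc]
          have hyt : y ∈ t := hmemt hy hyc
          have := hub y hyt
          rw [if_neg hyc] at this
          exact this
      · simp only [contribB]
        rw [if_neg hbdne]
        rw [if_neg hbdne] at hbdc
        exact hbdc
      · intro y hy hcy
        simp only [contribB] at hcy
        by_cases hyc : y = ch
        · subst hyc
          exact hlet bd hbdmem
        · rw [if_neg hyc] at hcy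
          have hyt : y ∈ t := hmemt hy hyc
          exact hmin y hyt (by rw [if_neg hyc]; exact hcy)
  · have hrdlt : rd < ch := lt_of_le_of_ne hrdch (fun e => hch e.symm)
    have hchnt : ch ∉ t := fun hmem => absurd (hlet ch hmem) (not_le.mpr hrdlt)
    have hrC : rc = cntF sf rd := by
      have h0 : rd ∉ ch :: r' := by
        intro hmem
        rcases List.mem_cons.mp hmem with e | hmem'
        · exact hch e.symm
        · exact absurd ((List.pairwise_cons.mp hpr).1 rd hmem') (not_le.mpr hrdlt)
      have h1 : sf.count rd = (t ++ ch :: r').count rd := (hperm.count_eq rd).symm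
      rw [List.count_append, List.count_eq_zero.mpr h0] at h1
      simp only [cntF]
      rw [h1, hrc]
      simp
    have hlast : ∀ h, (t ++ [ch]).getLast h = ch := fun _ => by simp
    have hcount : ((t ++ [ch]).count ch : Int) = 1 := by
      have h0 : List.count ch t = 0 := List.count_eq_zero.mpr hchnt
      simp [List.count_append, h0]
    have hcounto : ∀ y, y ≠ ch → (t ++ [ch]).count y = t.count y := by
      intro y hy
      simp [List.count_append, List.count_singleton, hy, Ne.symm hy]
    have hcompall : ∀ y ∈ t, ((t ++ [ch]).count y : Int) = cntF sf y := by
      intro y hy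
      have hyne : y ≠ ch := fun e => hchnt (e ▸ hy)
      rw [hcounto y hyne]
      by_cases hyrd : y = rd
      · subst hyrd
        rw [← hrc, hrC]
      · exact hcomp y hy hyrd
    have hcontribold : ∀ y ∈ t, (if y = rd then rc else cntF sf y) = cntF sf y := by
      intro y hy
      by_cases hyrd : y = rd
      · rw [if_pos hyrd, hyrd, hrC]
      · rw [if_neg hyrd]
    by_cases h1 : (1:Int) > bc
    · rw [stepB_new_eq bd ch rd bc rc hch h1]
      refine ⟨fun h => (hlast h).symm, by exact hcount.symm, ?_, ?_, by simp, by simp [contribB], ?_⟩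
      · intro y hy hyne
        simp only at hyne
        exact hcompall y (hmemt hy hyne)
      · intro y hy
        simp only [contribB]
        by_cases hyc : y = ch
        · simp [hyc]
        · rw [if_neg hyc]
          have hyt : y ∈ t := hmemt hy hyc
          have := hub y hyt
          rw [hcontribold y hyt] at this
          omega
      · intro y hy hcy
        simp only [contribB] at hcy
        by_cases hyc : y = ch
        · simp [hyc]
        · rw [if_neg hyc] at hcy
          have hyt : y ∈ t := hmemt hy hyc
          have := hub y hyt
          rw [hcontribold y hyt] at this
          omega
    · rw [stepB_new_ne bd ch rd bc rc hch h1]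
      have hbdne : bd ≠ ch := fun e => hchnt (e ▸ hbdmem)
      refine ⟨fun h => (hlast h).symm, by exact hcount.symm, ?_, ?_, by simp [hbdmem], ?_, ?_⟩
      · intro y hy hyne
        simp only at hyne
        exact hcompall y (hmemt hy hyne)
      · intro y hy
        simp only [contribB]
        by_cases hyc : y = ch
        · rw [if_pos hyc]; omega
        · rw [if_neg hyc]
          have hyt : y ∈ t := hmemt hy hyc
          have := hub y hyt
          rw [hcontribold y hyt] at this
          exact this
      · simp only [contribB]
        rw [if_neg hbdne]
        rw [hcontribold bd hbdmem] at hbdc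
        exact hbdc
      · intro y hy hcy
        simp only [contribB] at hcy
        by_cases hyc : y = ch
        · subst hyc
          exact le_trans (hlet bd hbdmem) hrdch
        · rw [if_neg hyc] at hcy
          have hyt : y ∈ t := hmemt hy hyc
          exact hmin y hyt (by rw [hcontribold y hyt]; exact hcy)

theorem B_loop (sf : List Char) : ∀ (r t : List Char) (st : Char × Int × Char × Int),
    (t ++ r).Pairwise (· ≤ ·) → (t ++ r).Perm sf → t ≠ [] → InvB sf t st →
    InvB sf (t ++ r) (r.foldl stepB st) := by
  intro r
  induction r with
  | nil =>
    intro t st hp hperm ht hinv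
    simpa using hinv
  | cons ch r' ih =>
    intro t st hp hperm ht hinv
    obtain ⟨bd, bc, rd, rc⟩ := st
    rw [List.foldl_cons]
    have heq : t ++ ch :: r' = (t ++ [ch]) ++ r' := by simp
    have h2 := ih (t ++ [ch]) (stepB (bd, bc, rd, rc) ch) (heq ▸ hp) (heq ▸ hperm) (by simp)
      (stepB_inv sf t r' ch bd bc rd rc hp hperm ht hinv)
    rw [heq]
    exact h2

theorem coreAB (sf : List Char) (hne : sf ≠ []) :
    (sf.foldl (stepA sf) (0, PySem.Dict.empty)).1 =
      ((PySem.List.sorted sf (fun c => c)).foldl stepB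
        (PySem.List.pyGetD (PySem.List.sorted sf (fun c => c)) 0 ' ', 0,
         PySem.List.pyGetD (PySem.List.sorted sf (fun c => c)) 0 ' ', 0)).2.1 ∧
    PySem.List.pyGetD (PySem.List.sorted
        ((sf.foldl (stepA sf) (0, PySem.Dict.empty)).2.getD
          (PySem.List.pyGetD
            (PySem.List.sorted (sf.foldl (stepA sf) (0, PySem.Dict.empty)).2.keys (fun k => k))
            (-1) 0) [])
        (fun c => c)) 0 ' ' =
      ((PySem.List.sorted sf (fun c => c)).foldl stepB
        (PySem.List.pyGetD (PySem.List.sorted sf (fun c => c)) 0 ' ', 0,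
         PySem.List.pyGetD (PySem.List.sorted sf (fun c => c)) 0 ' ', 0)).1 := by
  obtain ⟨c₀, hc₀⟩ := List.exists_mem_of_ne_nil sf hne
  have hcnt1 : ∀ c ∈ sf, 1 ≤ cntF sf c := by
    intro c hc
    have := List.count_pos_iff.mpr hc
    simp only [cntF]
    exact_mod_cast this
  have hcntM : ∀ c ∈ sf, cntF sf c ≤ (sf.map (cntF sf)).foldl max 0 :=
    fun c hc => (PySem.List.le_foldl_max (sf.map (cntF sf)) 0).2 _ (List.mem_map_of_mem hc)
  have hM1 : 1 ≤ (sf.map (cntF sf)).foldl max 0 := le_trans (hcnt1 c₀ hc₀) (hcntM c₀ hc₀)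
  -- ===== A side =====
  have hA1 : (sf.foldl (stepA sf) (0, PySem.Dict.empty)).1 = (sf.map (cntF sf)).foldl max 0 :=
    fstA sf sf 0 PySem.Dict.empty
  obtain ⟨hkeysle, hkeymem, hmem⟩ :=
    dictA sf ((sf.map (cntF sf)).foldl max 0) sf 0 PySem.Dict.empty
      (fun c hc => ⟨hcnt1 c hc, hcntM c hc⟩) le_rfl (by omega)
      (by intro k hk; simp [PySem.Dict.keys_empty] at hk) (by intro h; exact absurd rfl h)
  rw [hA1] at hkeysle hkeymem
  have hMkeys : (sf.map (cntF sf)).foldl max 0 ∈ (sf.foldl (stepA sf) (0, PySem.Dict.empty)).2.keys :=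
    hkeymem (by omega)
  have hKne : (sf.foldl (stepA sf) (0, PySem.Dict.empty)).2.keys ≠ [] := by
    intro h
    rw [h] at hMkeys
    exact absurd hMkeys (List.not_mem_nil)
  have hsKne : PySem.List.sorted (sf.foldl (stepA sf) (0, PySem.Dict.empty)).2.keys (fun k => k) ≠ [] := by
    rw [Ne, PySem.List.sorted_eq_nil_iff]
    exact hKne
  have hlk : PySem.List.pyGetD
      (PySem.List.sorted (sf.foldl (stepA sf) (0, PySem.Dict.empty)).2.keys (fun k => k)) (-1) 0 =
      (sf.map (cntF sf)).foldl max 0 := by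
    rw [PySem.List.pyGetD_neg_one _ _ hsKne]
    apply le_antisymm
    · exact hkeysle _ ((PySem.List.mem_sorted _ _ _ _).mp (List.getLast_mem hsKne))
    · exact le_getLast' _ hsKne (by simpa using PySem.List.sorted_pairwise _ (fun (k : Int) => k))
        _ ((PySem.List.mem_sorted _ _ _ _).mpr hMkeys)
  rw [hlk]
  have hLiff : ∀ x, x ∈ (sf.foldl (stepA sf) (0, PySem.Dict.empty)).2.getD
      ((sf.map (cntF sf)).foldl max 0) [] ↔ (x ∈ sf ∧ cntF sf x = (sf.map (cntF sf)).foldl max 0) := by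
    intro x
    rw [hmem x]
    simp [PySem.Dict.getD_empty]
  have hach : ∃ c ∈ sf, cntF sf c = (sf.map (cntF sf)).foldl max 0 := by
    rcases foldl_max_attain (sf.map (cntF sf)) 0 with h | h
    · omega
    · rcases List.mem_map.mp h with ⟨c, hc, hc2⟩
      exact ⟨c, hc, hc2⟩
  obtain ⟨ca, hca, hcaM⟩ := hach
  have hLne : (sf.foldl (stepA sf) (0, PySem.Dict.empty)).2.getD ((sf.map (cntF sf)).foldl max 0) [] ≠ [] := by
    intro h
    have := (hLiff ca).mpr ⟨hca, hcaM⟩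
    rw [h] at this
    exact absurd this (List.not_mem_nil)
  have hsLne : PySem.List.sorted
      ((sf.foldl (stepA sf) (0, PySem.Dict.empty)).2.getD ((sf.map (cntF sf)).foldl max 0) [])
      (fun c => c) ≠ [] := by
    rw [Ne, PySem.List.sorted_eq_nil_iff]
    exact hLne
  obtain ⟨mh, mt, hml⟩ : ∃ mh mt, PySem.List.sorted
      ((sf.foldl (stepA sf) (0, PySem.Dict.empty)).2.getD ((sf.map (cntF sf)).foldl max 0) [])
      (fun c => c) = mh :: mt := by
    rcases hq : PySem.List.sorted
      ((sf.foldl (stepA sf) (0, PySem.Dict.empty)).2.getD ((sf.map (cntF sf)).foldl max 0) [])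
      (fun c => c) with _ | ⟨mh, mt⟩
    · exact absurd hq hsLne
    · exact ⟨mh, mt, rfl⟩
  rw [hml, PySem.List.pyGetD_zero_cons]
  have hmhL : mh ∈ (sf.foldl (stepA sf) (0, PySem.Dict.empty)).2.getD ((sf.map (cntF sf)).foldl max 0) [] :=
    (PySem.List.mem_sorted _ _ _ _).mp (hml ▸ List.mem_cons_self)
  have hmhmin : ∀ y ∈ (sf.foldl (stepA sf) (0, PySem.Dict.empty)).2.getD ((sf.map (cntF sf)).foldl max 0) [],
      mh ≤ y := PySem.List.key_head_sorted_le _ (fun c => c) hml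
  -- ===== B side =====
  have hsperm : (PySem.List.sorted sf (fun c : Char => c)).Perm sf := PySem.List.sorted_perm sf _ false
  have hsp : (PySem.List.sorted sf (fun c : Char => c)).Pairwise (· ≤ ·) := by
    simpa using PySem.List.sorted_pairwise sf (fun c : Char => c)
  have hsne : PySem.List.sorted sf (fun c : Char => c) ≠ [] := by
    rw [Ne, PySem.List.sorted_eq_nil_iff]
    exact hne
  obtain ⟨c1, s', hs⟩ : ∃ c1 s', PySem.List.sorted sf (fun c : Char => c) = c1 :: s' := by
    rcases hq : PySem.List.sorted sf (fun c : Char => c) with _ | ⟨c1, s'⟩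
    · exact absurd hq hsne
    · exact ⟨c1, s', rfl⟩
  rw [hs, PySem.List.pyGetD_zero_cons, List.foldl_cons]
  have hinit : InvB sf [c1] (stepB (c1, 0, c1, 0) c1) := by
    rw [stepB_pos_eq c1 c1 0 0 (by omega)]
    refine ⟨fun h => by simp, by simp, ?_, ?_, by simp, by simp [contribB], ?_⟩
    · intro y hy hyne
      simp at hy
      simp only at hyne
      exact absurd hy hyne
    · intro y hy
      simp at hy
      subst hy
      simp [contribB]
    · intro y hy hcy
      simp at hy
      simp [hy]
  have hBloop := B_loop sf s' [c1] (stepB (c1, 0, c1, 0) c1)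
    (by rw [hs] at hsp; simpa using hsp)
    (by rw [hs] at hsperm; simpa using hsperm)
    (by simp) hinit
  rw [List.singleton_append, ← hs] at hBloop
  obtain ⟨hfr, hfc, hfcomp, hfub, hfbd, hfbdc, hfmin⟩ := hBloop
  have hrcC : (s'.foldl stepB (stepB (c1, 0, c1, 0) c1)).2.2.2 =
      cntF sf (s'.foldl stepB (stepB (c1, 0, c1, 0) c1)).2.2.1 := by
    rw [hfc]
    simp only [cntF]
    rw [hsperm.count_eq]
  have hcontrib : ∀ y, contribB sf (s'.foldl stepB (stepB (c1, 0, c1, 0) c1)) y = cntF sf y := by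
    intro y
    unfold contribB
    by_cases hy : y = (s'.foldl stepB (stepB (c1, 0, c1, 0) c1)).2.2.1
    · rw [if_pos hy, hy, ← hrcC]
    · rw [if_neg hy]
  have hub' : ∀ y ∈ sf, cntF sf y ≤ (s'.foldl stepB (stepB (c1, 0, c1, 0) c1)).2.1 := by
    intro y hy
    rw [← hcontrib y]
    exact hfub y (hsperm.mem_iff.mpr hy)
  have hbd_sf : (s'.foldl stepB (stepB (c1, 0, c1, 0) c1)).1 ∈ sf := hsperm.subset hfbd
  have hbdC : cntF sf (s'.foldl stepB (stepB (c1, 0, c1, 0) c1)).1 =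
      (s'.foldl stepB (stepB (c1, 0, c1, 0) c1)).2.1 := by
    rw [← hcontrib]
    exact hfbdc
  have hmin' : ∀ y ∈ sf, cntF sf y = (s'.foldl stepB (stepB (c1, 0, c1, 0) c1)).2.1 →
      (s'.foldl stepB (stepB (c1, 0, c1, 0) c1)).1 ≤ y := by
    intro y hy hcy
    exact hfmin y (hsperm.mem_iff.mpr hy) (by rw [hcontrib]; exact hcy)
  have hbc0 : (0:Int) ≤ (s'.foldl stepB (stepB (c1, 0, c1, 0) c1)).2.1 := by
    have := hcnt1 _ hbd_sf
    omega
  have hbcM : (s'.foldl stepB (stepB (c1, 0, c1, 0) c1)).2.1 = (sf.map (cntF sf)).foldl max 0 := by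
    apply le_antisymm
    · rw [← hbdC]
      exact hcntM _ hbd_sf
    · apply foldl_max_le _ 0 _ hbc0
      intro y hy
      rcases List.mem_map.mp hy with ⟨c, hc, rfl⟩
      exact hub' c hc
  constructor
  · rw [hA1, ← hbcM]
  · apply le_antisymm
    · apply hmhmin
      rw [hLiff]
      exact ⟨hbd_sf, by rw [hbdC, hbcM]⟩
    · apply hmin' mh ((hLiff mh).mp hmhL).1
      rw [((hLiff mh).mp hmhL).2, hbcM]

-- string assembly: the two ports differ only in the (maxcnt, digit) middle
theorem assembled (sf : List Char) (hne : sf ≠ []) :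
    "Last chunk " ++ String.ofList (PySem.List.slice sf
        (some (-(if PySem.Int.mod (PySem.List.len sf) 25 = 0 then 25
                 else PySem.Int.mod (PySem.List.len sf) 25))) none) ++
      "; Max is " ++ PySem.Int.toStr (sf.foldl (stepA sf) (0, PySem.Dict.empty)).1 ++
      " for digit " ++ String.ofList [PySem.List.pyGetD (PySem.List.sorted
        ((sf.foldl (stepA sf) (0, PySem.Dict.empty)).2.getD
          (PySem.List.pyGetD
            (PySem.List.sorted (sf.foldl (stepA sf) (0, PySem.Dict.empty)).2.keys (fun k => k))
            (-1) 0) [])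
        (fun c => c)) 0 ' '] =
    "Last chunk " ++ String.ofList (PySem.List.slice sf
        (some (-(if PySem.Int.mod (PySem.List.len sf) 25 = 0 then 25
                 else PySem.Int.mod (PySem.List.len sf) 25))) none) ++
      "; Max is " ++ PySem.Int.toStr ((PySem.List.sorted sf (fun c => c)).foldl stepB
        (PySem.List.pyGetD (PySem.List.sorted sf (fun c => c)) 0 ' ', 0,
         PySem.List.pyGetD (PySem.List.sorted sf (fun c => c)) 0 ' ', 0)).2.1 ++
      " for digit " ++ String.ofList [((PySem.List.sorted sf (fun c => c)).foldl stepB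
        (PySem.List.pyGetD (PySem.List.sorted sf (fun c => c)) 0 ' ', 0,
         PySem.List.pyGetD (PySem.List.sorted sf (fun c => c)) 0 ' ', 0)).1] := by
  obtain ⟨h1, h2⟩ := coreAB sf hne
  rw [h1, h2]

-- ===== VERDICT (by name: the statement is the Claim_ definition above) =====
theorem around_fib_a2_spec : Claim_equal_around_fib_a2 := by
  intro n _ _
  show around_fib_a2 n = around_fib_a2_alt n
  exact assembled
    (PySem.Int.toChars
      (PySem.Int.mod
        (PySem.Int.powMod (2 <<< n.toNat) (n + 1).toNat
          ((4 <<< (2 * n).toNat) - (2 <<< n.toNat) - 1))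
        (2 <<< n.toNat)))
    (toChars_ne_nil _)
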